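-- pv_equiv track=rewrite | github.com/Sahussawat/COOP-Project | COOP/Environment_coop_version9.py | convert_base10_to_base27
-- ===== SOURCE A (Python) =====
-- def convert_base10_to_base27 (decimal):
--     conversion_table = {0: '0', 1: '1', 2: '2', 3: '3', 4: '4',
--                         5: '5', 6: '6', 7: '7',
--                         8: '8', 9: '9', 10: 'A', 11: 'B', 12: 'C',
--                         13: 'D', 14: 'E', 15: 'F', 16 : 'G' , 17 : 'H',
--                         18 : 'I', 19 : 'J', 20 : 'K', 21 : 'L', 22 : 'M',
--                         23 : 'N', 24 : 'O', 25 : 'P', 26 : 'Q'}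
--     base27 = ''
--     while(decimal > 0):
--             remainder = decimal % 27
--             base27  = conversion_table[remainder] + base27
--             decimal = decimal // 27
--
--     while len(base27) < 9:
--         base27 = "0" + base27
--
--     return base27
-- ===== SOURCE B (Python) =====
-- def convert_base10_to_base27(decimal):
--     # MSD-first: count digits, extract each digit by power-of-27 division, pad with zfill.
--     table = "0123456789ABCDEFGHIJKLMNOPQ"
--     n = 0
--     d = decimal
--     while d > 0:
--         d //= 27
--         n += 1
--     chars = [table[(decimal // 27 ** i) % 27] for i in reversed(range(n))]
--     return "".join(chars).zfill(9)
-- ===== Notes on version B (the rewrite author's own statement) =====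
-- stated objective: alternative
-- what changed: B replaces A's least-significant-first repeated-division loop with string prepending (plus a while-loop padding pass) by counting the digits first and then extracting digits most-significant-first via powers of 27 into a list, joined and padded with zfill(9).
import Mathlib
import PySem

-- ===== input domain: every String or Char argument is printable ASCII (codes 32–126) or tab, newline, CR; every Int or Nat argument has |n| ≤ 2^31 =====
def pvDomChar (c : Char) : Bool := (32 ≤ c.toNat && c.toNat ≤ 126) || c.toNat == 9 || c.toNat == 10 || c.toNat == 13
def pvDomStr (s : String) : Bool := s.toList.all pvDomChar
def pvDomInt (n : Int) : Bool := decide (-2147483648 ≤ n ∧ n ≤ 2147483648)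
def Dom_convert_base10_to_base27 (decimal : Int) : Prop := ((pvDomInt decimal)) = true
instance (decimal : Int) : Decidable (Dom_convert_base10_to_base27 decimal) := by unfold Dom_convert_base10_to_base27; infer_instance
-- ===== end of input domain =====

-- B counts the digits first and extracts them most-significant-first via powers of 27,
-- joining once and padding with zfill(9), instead of A's least-significant-first
-- repeated-division loop with string prepending and a while-loop padding pass.


-- ===== PORT A =====
-- conversion_table, literally
def pvConvDict : PySem.Dict Int String := PySem.Dict.ofList
  [(0, "0"), (1, "1"), (2, "2"), (3, "3"), (4, "4"), (5, "5"), (6, "6"), (7, "7"),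
   (8, "8"), (9, "9"), (10, "A"), (11, "B"), (12, "C"), (13, "D"), (14, "E"), (15, "F"),
   (16, "G"), (17, "H"), (18, "I"), (19, "J"), (20, "K"), (21, "L"), (22, "M"),
   (23, "N"), (24, "O"), (25, "P"), (26, "Q")]

-- helper for the termination of the division loops
theorem pv_floordiv27_toNat_lt (d : Int) (h : d > 0) :
    (PySem.Int.floordiv d 27).toNat < d.toNat := by
  rw [PySem.Int.floordiv_eq_ediv_of_pos (by norm_num)]
  have h1 := Int.mul_ediv_add_emod d 27
  have h2 := Int.emod_nonneg d (by norm_num : (27:Int) ≠ 0)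
  have h3 := Int.emod_lt_of_pos d (by norm_num : (0:Int) < 27)
  omega

-- while(decimal > 0): remainder = decimal % 27; base27 = conversion_table[remainder] + base27; decimal //= 27
-- (strings are modeled as List Char; the dict lookup never misses since 0 ≤ remainder < 27,
--  so conversion_table[remainder] is ported as getD with an unreachable "" default)
def pvALoop (decimal : Int) (base27 : List Char) : List Char :=
  if h : decimal > 0 then
    let remainder := PySem.Int.mod decimal 27
    pvALoop (PySem.Int.floordiv decimal 27) ((pvConvDict.getD remainder "").toList ++ base27)
  else base27
  termination_by decimal.toNat
  decreasing_by exact pv_floordiv27_toNat_lt decimal h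

-- while len(base27) < 9: base27 = "0" + base27
def pvPad (s : List Char) : List Char :=
  if s.length < 9 then pvPad ('0' :: s) else s
  termination_by 9 - s.length

def convert_base10_to_base27 (decimal : Int) : String :=
  String.ofList (pvPad (pvALoop decimal []))

-- ===== PORT B =====
def pvTable27 : List Char := "0123456789ABCDEFGHIJKLMNOPQ".toList

-- while d > 0: d //= 27; n += 1
def pvBCount (d : Int) (n : Int) : Int :=
  if hd : d > 0 then pvBCount (PySem.Int.floordiv d 27) (n + 1) else n
  termination_by d.toNat
  decreasing_by exact pv_floordiv27_toNat_lt d hd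

-- [table[(decimal // 27 ** i) % 27] for i in reversed(range(n))]; "".join(chars).zfill(9)
-- (i ∈ range(n) is nonnegative, so 27 ** i is ported exactly as 27 ^ i.toNat;
--  the table index is in [0, 27), so table[...] is ported as pyGetD with an unreachable ' ' default;
--  zfill(9) on a sign-free digit string is left-padding with '0' to length ≥ 9)
def convert_base10_to_base27_alt (decimal : Int) : String :=
  let n := pvBCount decimal 0
  let chars := ((PySem.List.pyRange 0 n 1).reverse).map
    (fun i => PySem.List.pyGetD pvTable27
      (PySem.Int.mod (PySem.Int.floordiv decimal (27 ^ i.toNat)) 27) ' ')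
  String.ofList (List.replicate (9 - chars.length) '0' ++ chars)

-- ===== PRECONDITION & SPEC =====
def Spec_convert_base10_to_base27 (decimal : Int) (out : String) : Prop := out = convert_base10_to_base27_alt decimal
instance (decimal : Int) (out : String) : Decidable (Spec_convert_base10_to_base27 decimal out) := by unfold Spec_convert_base10_to_base27; infer_instance

-- ===== CLAIM (what is proved, stated in full; the proofs are below) =====
def Claim_equal_convert_base10_to_base27 : Prop := ∀ (decimal : Int), Dom_convert_base10_to_base27 decimal → Spec_convert_base10_to_base27 decimal (convert_base10_to_base27 decimal)

-- ===== LEMMAS AND PROOFS =====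

-- canonical most-significant-first digit string of a natural number
def pvDigits (m : Nat) : List Char :=
  if m = 0 then [] else pvDigits (m / 27) ++ [pvTable27.getD (m % 27) ' ']
  termination_by m
  decreasing_by exact Nat.div_lt_self (Nat.pos_of_ne_zero (by assumption)) (by norm_num)

-- canonical digit count
def pvND (m : Nat) : Nat :=
  if m = 0 then 0 else pvND (m / 27) + 1
  termination_by m
  decreasing_by exact Nat.div_lt_self (Nat.pos_of_ne_zero (by assumption)) (by norm_num)

theorem pv_dict_lookup (k : Nat) (hk : k < 27) :
    (pvConvDict.getD (k : Int) "").toList = [pvTable27.getD k ' '] := by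
  interval_cases k <;> decide

theorem pv_aloop_nat (m : Nat) (acc : List Char) :
    pvALoop (m : Int) acc = pvDigits m ++ acc := by
  induction m using Nat.strong_induction_on generalizing acc with
  | _ m ih =>
    rw [pvALoop, pvDigits]
    by_cases hm : m = 0
    · simp [hm]
    · have hpos : (0:Int) < (m:Int) := by exact_mod_cast Nat.pos_of_ne_zero hm
      rw [dif_pos hpos]
      have hf : PySem.Int.floordiv (m : Int) 27 = ((m / 27 : Nat) : Int) := by
        exact_mod_cast PySem.Int.floordiv_natCast m 27
      have hmod : PySem.Int.mod (m : Int) 27 = ((m % 27 : Nat) : Int) := by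
        exact_mod_cast PySem.Int.mod_natCast m 27
      simp only [hf, hmod]
      rw [pv_dict_lookup (m % 27) (Nat.mod_lt m (by norm_num)),
          ih (m / 27) (Nat.div_lt_self (Nat.pos_of_ne_zero hm) (by norm_num)),
          if_neg hm]
      simp

theorem pv_aloop_eq (d : Int) (acc : List Char) :
    pvALoop d acc = pvDigits d.toNat ++ acc := by
  by_cases hd : d > 0
  · have h : d = (d.toNat : Int) := by omega
    rw [h, pv_aloop_nat, Int.toNat_natCast]
  · rw [pvALoop, dif_neg hd, pvDigits, if_pos (by omega)]
    simp

theorem pv_pad_eq (s : List Char) :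
    pvPad s = List.replicate (9 - s.length) '0' ++ s := by
  induction s using pvPad.induct with
  | case1 s hlen ih =>
    rw [pvPad, if_pos hlen, ih]
    have h1 : 9 - s.length = (8 - s.length) + 1 := by omega
    have h2 : 9 - ('0' :: s).length = 8 - s.length := by
      simp only [List.length_cons]; omega
    rw [h1, h2, List.replicate_succ']
    simp
  | case2 s hlen =>
    rw [pvPad, if_neg hlen]
    have : 9 - s.length = 0 := by omega
    simp [this]

theorem pv_bcount_nat (m : Nat) (n : Int) :
    pvBCount (m : Int) n = (pvND m : Int) + n := by
  induction m using Nat.strong_induction_on generalizing n with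
  | _ m ih =>
    rw [pvBCount, pvND]
    by_cases hm : m = 0
    · simp [hm]
    · have hpos : (0:Int) < (m:Int) := by exact_mod_cast Nat.pos_of_ne_zero hm
      rw [dif_pos hpos]
      have hf : PySem.Int.floordiv (m : Int) 27 = ((m / 27 : Nat) : Int) := by
        exact_mod_cast PySem.Int.floordiv_natCast m 27
      simp only [hf]
      rw [ih (m / 27) (Nat.div_lt_self (Nat.pos_of_ne_zero hm) (by norm_num)),
          if_neg hm]
      push_cast
      ring

theorem pv_bcount_eq (d : Int) (n : Int) :
    pvBCount d n = (pvND d.toNat : Int) + n := by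
  by_cases hd : d > 0
  · have h : d = (d.toNat : Int) := by omega
    rw [h, pv_bcount_nat, Int.toNat_natCast]
  · rw [pvBCount, dif_neg hd, pvND, if_pos (by omega)]
    simp

theorem pv_bchars_eq (m : Nat) :
    ((List.range (pvND m)).reverse).map
      (fun k => pvTable27.getD ((m / 27 ^ k) % 27) ' ') = pvDigits m := by
  induction m using Nat.strong_induction_on with
  | _ m ih =>
    rw [pvND, pvDigits]
    by_cases hm : m = 0
    · simp [hm]
    · rw [if_neg hm, if_neg hm, List.range_succ_eq_map, List.reverse_cons, List.map_append]
      congr 1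
      · rw [← ih (m / 27) (Nat.div_lt_self (Nat.pos_of_ne_zero hm) (by norm_num)),
            List.map_reverse, List.map_reverse, List.map_map]
        congr 1
        apply List.map_congr_left
        intro k _
        simp only [Function.comp_apply]
        congr 2
        rw [Nat.div_div_eq_div_mul, ← pow_succ']
      · simp

-- ===== VERDICT (by name: the statement is the Claim_ definition above) =====
theorem convert_base10_to_base27_spec : Claim_equal_convert_base10_to_base27 := by
  intro d _
  have hchars : ((PySem.List.pyRange 0 ((pvND d.toNat : Int)) 1).reverse).map
      (fun i => PySem.List.pyGetD pvTable27
        (PySem.Int.mod (PySem.Int.floordiv d (27 ^ i.toNat)) 27) ' ') = pvDigits d.toNat := by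
    rw [PySem.List.pyRange_zero_nat, ← List.map_reverse, List.map_map,
        ← pv_bchars_eq d.toNat]
    apply List.map_congr_left
    intro k hk
    simp only [Function.comp_apply, Int.toNat_natCast]
    by_cases hd : d > 0
    · have hdn : d = (d.toNat : Int) := by omega
      rw [hdn, show ((27:Int) ^ k) = ((27 ^ k : Nat) : Int) by push_cast; ring]
      have hf : PySem.Int.floordiv ((d.toNat : Int)) ((27 ^ k : Nat) : Int)
          = ((d.toNat / 27 ^ k : Nat) : Int) := PySem.Int.floordiv_natCast _ _
      have hmod : PySem.Int.mod ((d.toNat / 27 ^ k : Nat) : Int) 27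
          = ((d.toNat / 27 ^ k % 27 : Nat) : Int) := by
        exact_mod_cast PySem.Int.mod_natCast (d.toNat / 27 ^ k) 27
      rw [hf, hmod, PySem.List.pyGetD_natCast, Int.toNat_natCast]
    · -- d ≤ 0: the range is empty, so k ∈ reverse (range (pvND d.toNat)) is impossible
      exfalso
      have h0 : d.toNat = 0 := by omega
      rw [h0] at hk
      simp [pvND] at hk
  unfold Spec_convert_base10_to_base27 convert_base10_to_base27 convert_base10_to_base27_alt
  rw [pv_aloop_eq, List.append_nil, pv_pad_eq]
  simp only [pv_bcount_eq, add_zero]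
  rw [hchars]
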